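-- pv_equiv track=rewrite | github.com/carpsesdema/Py_DevAI_Studio | services/chunking_service.py | _get_line_start_indices
-- ===== SOURCE A (Python) =====
-- from typing import List, Dict, Any
--
-- def _get_line_start_indices(text: str) -> List[int]:
--     """Calculates the starting character index of each line."""
--     indices = [0]  # Line 1 starts at index 0
--     current_pos = 0
--     while True:
--         next_newline = text.find('\n', current_pos)
--         if next_newline == -1:
--             break
--         indices.append(next_newline + 1)
--         current_pos = next_newline + 1
--     return indices
-- ===== SOURCE B (Python) =====
-- from typing import List
--
-- def _get_line_start_indices(text: str) -> List[int]:
--     """Calculates the starting character index of each line."""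
--     return [0] + [i + 1 for i, ch in enumerate(text) if ch == '\n']
-- ===== Notes on version B (the rewrite author's own statement) =====
-- stated objective: simpler
-- what changed: Replaced the while-loop that repeatedly calls text.find with an advancing cursor by a single list comprehension over enumerate(text) collecting i+1 for each newline character.
import Mathlib
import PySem

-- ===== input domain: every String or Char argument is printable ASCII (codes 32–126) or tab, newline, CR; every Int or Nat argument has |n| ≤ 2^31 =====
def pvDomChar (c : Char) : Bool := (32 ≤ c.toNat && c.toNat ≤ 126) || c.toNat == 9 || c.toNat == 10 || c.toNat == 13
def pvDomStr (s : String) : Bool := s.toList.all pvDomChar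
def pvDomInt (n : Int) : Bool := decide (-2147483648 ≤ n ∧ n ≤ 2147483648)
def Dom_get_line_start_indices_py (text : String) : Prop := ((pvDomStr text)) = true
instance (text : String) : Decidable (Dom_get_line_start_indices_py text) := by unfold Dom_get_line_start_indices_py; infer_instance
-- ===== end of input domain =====

-- B replaces A's cursor-advancing while-loop over text.find('\n', pos) with a single
-- comprehension over enumerate(text); objective: simpler (same return value).

-- ===== PORT A =====
-- termination helper for A's loop: when find succeeds, the found index is ≥ pos and < length
theorem pvFindFromBounds (cs : List Char) (pos : Nat)
    (h : PySem.Chars.findFrom cs ['\n'] (pos : Int) none ≠ -1) :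
    pos ≤ (PySem.Chars.findFrom cs ['\n'] (pos : Int) none).toNat ∧
      (PySem.Chars.findFrom cs ['\n'] (pos : Int) none).toNat < cs.length := by
  by_cases hk : pos ≤ cs.length
  · rw [PySem.Chars.findFrom_natCast cs ['\n'] pos hk] at h ⊢
    set r := PySem.Chars.find (cs.drop pos) ['\n'] with hr
    have hrne : r ≠ -1 := by intro hc; simp [hc] at h
    have hr0 : 0 ≤ r := by have := PySem.Chars.neg_one_le_find (cs.drop pos) ['\n']; omega
    have hspec := PySem.Chars.find_spec (s := cs.drop pos) (sub := ['\n']) hr0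
    obtain ⟨t, ht⟩ := hspec.1
    have hlt : r.toNat < (cs.drop pos).length := by
      by_contra hge
      rw [List.drop_eq_nil_of_le (by omega)] at ht
      simp at ht
    simp only [if_neg hrne]
    rw [List.length_drop] at hlt
    omega
  · exfalso
    apply h
    simp only [PySem.Chars.findFrom]
    have h1 : ¬ ((pos : Int) < 0) := by omega
    simp only [if_neg h1]
    rw [if_pos (by exact_mod_cast by omega)]

-- A: while True: next_newline = text.find('\n', current_pos); if -1 break; append; advance
def pvAGo (text : List Char) (current_pos : Nat) (indices : List Int) : List Int :=
  let next_newline := PySem.Chars.findFrom text ['\n'] (current_pos : Int) none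
  if h : next_newline = -1 then indices
  else
    pvAGo text (next_newline.toNat + 1) (indices ++ [next_newline + 1])
termination_by text.length - current_pos
decreasing_by
  have := pvFindFromBounds text current_pos h
  omega

def get_line_start_indices_py (text : String) : List Int :=
  pvAGo text.toList 0 [0]

-- ===== PORT B =====
def get_line_start_indices_py_alt (text : String) : List Int :=
  0 :: (PySem.List.enumerate text.toList 0).filterMap
        (fun p => if p.2 = '\n' then some (p.1 + 1) else none)

-- ===== PRECONDITION & SPEC =====
def Spec_get_line_start_indices_py (text : String) (out : List Int) : Prop := out = get_line_start_indices_py_alt text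
instance (text : String) (out : List Int) : Decidable (Spec_get_line_start_indices_py text out) := by unfold Spec_get_line_start_indices_py; infer_instance

-- ===== CLAIM (what is proved, stated in full; the proofs are below) =====
def Claim_equal_get_line_start_indices_py : Prop := ∀ (text : String), Dom_get_line_start_indices_py text → Spec_get_line_start_indices_py text (get_line_start_indices_py text)

-- ===== LEMMAS AND PROOFS =====

-- reference: positions-after-newlines of cs, indices offset by i
def pvNl (cs : List Char) (i : Int) : List Int :=
  match cs with
  | [] => []
  | c :: t => if c = '\n' then (i + 1) :: pvNl t (i + 1) else pvNl t (i + 1)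

theorem pvNl_of_not_mem (cs : List Char) (i : Int) (h : '\n' ∉ cs) : pvNl cs i = [] := by
  induction cs generalizing i with
  | nil => rfl
  | cons c t ih =>
    simp only [List.mem_cons, not_or] at h
    simp [pvNl, Ne.symm h.1, ih (i + 1) h.2]

theorem pvNl_append (m r : List Char) (i : Int) (h : '\n' ∉ m) :
    pvNl (m ++ '\n' :: r) i = (i + m.length + 1) :: pvNl r (i + m.length + 1) := by
  induction m generalizing i with
  | nil => simp [pvNl]
  | cons c t ih =>
    simp only [List.mem_cons, not_or] at h
    simp only [List.cons_append, pvNl, if_neg (Ne.symm h.1), ih (i+1) h.2]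
    rw [show (i + 1 + (t.length : Int) + 1) = i + ((c :: t).length : Int) + 1 from by
          push_cast [List.length_cons]; ring]

theorem pvNl_filterMap (cs : List Char) (i : Int) :
    (PySem.List.enumerate cs i).filterMap
      (fun p => if p.2 = '\n' then some (p.1 + 1) else none) = pvNl cs i := by
  induction cs generalizing i with
  | nil => simp [PySem.List.enumerate_nil, pvNl]
  | cons c t ih =>
    simp only [PySem.List.enumerate_cons, List.filterMap_cons, pvNl]
    by_cases hc : c = '\n' <;> simp [hc, ih]

theorem pvAGo_eq (cs : List Char) (pos : Nat) (acc : List Int) :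
    pvAGo cs pos acc = acc ++ pvNl (cs.drop pos) (pos : Int) := by
  rw [pvAGo]
  by_cases h : PySem.Chars.findFrom cs ['\n'] (pos : Int) none = -1
  · simp [h]
    by_cases hk : pos ≤ cs.length
    · have hni : ¬ ['\n'] <:+: cs.drop pos :=
        (PySem.Chars.findFrom_natCast_eq_neg_one_iff cs ['\n'] pos hk).mp h
      have hmem : '\n' ∉ cs.drop pos := fun hm =>
        hni ((List.singleton_infix_iff _ _).mpr hm)
      simp [pvNl_of_not_mem _ _ hmem]
    · rw [List.drop_eq_nil_of_le (by omega)]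
      simp [pvNl]
  · have hb := pvFindFromBounds cs pos h
    have hk : pos ≤ cs.length := by omega
    simp only [dif_neg h]
    rw [pvAGo_eq cs _ _]
    rw [PySem.Chars.findFrom_natCast cs ['\n'] pos hk] at h hb ⊢
    set r := PySem.Chars.find (cs.drop pos) ['\n'] with hrdef
    have hrne : r ≠ -1 := by intro hc; simp [hc] at h
    have hr0 : 0 ≤ r := by have := PySem.Chars.neg_one_le_find (cs.drop pos) ['\n']; omega
    simp only [if_neg hrne] at hb ⊢
    have hspec := PySem.Chars.find_spec (s := cs.drop pos) (sub := ['\n']) hr0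
    obtain ⟨t, ht⟩ := hspec.1
    -- decomposition of the suffix at the found newline
    have hrlt : r.toNat < (cs.drop pos).length := by
      by_contra hge
      rw [List.drop_eq_nil_of_le (by omega)] at ht
      simp at ht
    have hdec : cs.drop pos = (cs.drop pos).take r.toNat ++ '\n' :: t := by
      conv_lhs => rw [← List.take_append_drop r.toNat (cs.drop pos)]
      rw [← ht]; simp
    have hnm : '\n' ∉ (cs.drop pos).take r.toNat := by
      intro hm
      obtain ⟨i, hi, hgi⟩ := List.getElem_of_mem hm
      rw [List.length_take] at hi
      have hi' : i < (cs.drop pos).length := by omega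
      apply hspec.2 i (by omega)
      rw [List.drop_eq_getElem_cons hi']
      rw [List.getElem_take] at hgi
      exact ⟨_, by rw [hgi]; rfl⟩
    have htt : cs.drop (((pos : Int) + r).toNat + 1) = t := by
      have h1 : ((pos : Int) + r).toNat + 1 = pos + (r.toNat + 1) := by omega
      rw [h1, ← List.drop_drop, hdec]
      rw [show r.toNat + 1 = ((cs.drop pos).take r.toNat).length + 1 from by
            rw [List.length_take]; omega]
      rw [List.drop_length_add_append]
      simp
    rw [htt, hdec, pvNl_append _ _ _ hnm]
    have hlen : (((cs.drop pos).take r.toNat).length : Int) = r := by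
      rw [List.length_take]
      have : min r.toNat (cs.drop pos).length = r.toNat := by omega
      rw [this]; omega
    have h2 : ((((pos : Int) + r).toNat : Int) + 1) = (pos : Int) + r + 1 := by omega
    rw [hlen, List.append_assoc]
    congr 1
    simp only [List.cons_append, List.nil_append]
    rw [show (((((pos : Int) + r).toNat + 1 : Nat)) : Int) = (pos : Int) + r + 1 from by omega]
termination_by cs.length - pos
decreasing_by
  have := pvFindFromBounds cs pos h
  omega

-- ===== VERDICT (by name: the statement is the Claim_ definition above) =====
theorem get_line_start_indices_py_spec : Claim_equal_get_line_start_indices_py := by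
  intro text _
  unfold Spec_get_line_start_indices_py get_line_start_indices_py get_line_start_indices_py_alt
  rw [pvAGo_eq, pvNl_filterMap]
  simp
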